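-- pv_equiv track=rewrite | github.com/Furiwarius/Homework_python_5 | homework_022.py | game_against_computer
-- ===== SOURCE A (Python) =====
-- def game_against_computer(candy):
--
--     if candy<=28:
--         return candy
--     else:
--         numbers = [val for val in range(1, 28)]
--         for num in numbers:
--             if  candy-num-28==30:
--                 return num
--             elif candy-num==29:
--                 return num
--     return 28
-- ===== SOURCE B (Python) =====
-- def game_against_computer(candy):
--     if candy <= 28:
--         return candy
--     n1 = candy - 58
--     if 1 <= n1 <= 27:
--         return n1
--     n2 = candy - 29
--     if 1 <= n2 <= 27:
--         return n2
--     return 28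
-- ===== Notes on version B (the rewrite author's own statement) =====
-- stated objective: simpler
-- what changed: Replaces the range(1,28) scan with a direct closed-form dispatch: compute candy-58 and candy-29 and return whichever lands in [1,27] (their valid candy ranges are disjoint), else 28.
import Mathlib
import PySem

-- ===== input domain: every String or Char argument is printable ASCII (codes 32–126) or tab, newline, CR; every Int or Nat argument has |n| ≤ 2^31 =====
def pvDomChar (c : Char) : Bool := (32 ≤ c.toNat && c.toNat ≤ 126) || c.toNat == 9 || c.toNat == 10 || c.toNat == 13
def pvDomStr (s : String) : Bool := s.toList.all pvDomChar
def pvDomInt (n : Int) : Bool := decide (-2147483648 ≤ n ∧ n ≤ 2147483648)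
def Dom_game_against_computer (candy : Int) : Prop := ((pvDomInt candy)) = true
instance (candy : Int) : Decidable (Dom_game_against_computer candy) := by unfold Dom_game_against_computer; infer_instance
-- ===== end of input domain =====

-- B replaces A's range(1,28) scan with a closed-form dispatch on candy-58 / candy-29 (simpler, no loop).


-- ===== PORT A =====
-- the for-loop over `numbers` with its two early returns
def gacLoop (candy : Int) : List Int → Int
  | [] => 28
  | num :: rest =>
    if candy - num - 28 = 30 then num
    else if candy - num = 29 then num
    else gacLoop candy rest

def game_against_computer (candy : Int) : Int :=
  if candy ≤ 28 then candy
  else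
    let numbers := PySem.List.pyRange 1 28 1
    gacLoop candy numbers

-- ===== PORT B =====
def game_against_computer_alt (candy : Int) : Int :=
  if candy ≤ 28 then candy
  else
    let n1 := candy - 58
    if 1 ≤ n1 ∧ n1 ≤ 27 then n1
    else
      let n2 := candy - 29
      if 1 ≤ n2 ∧ n2 ≤ 27 then n2
      else 28

-- ===== PRECONDITION & SPEC =====
def Spec_game_against_computer (candy : Int) (out : Int) : Prop := out = game_against_computer_alt candy
instance (candy : Int) (out : Int) : Decidable (Spec_game_against_computer candy out) := by unfold Spec_game_against_computer; infer_instance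

-- ===== CLAIM (what is proved, stated in full; the proofs are below) =====
def Claim_equal_game_against_computer : Prop := ∀ (candy : Int), Dom_game_against_computer candy → Spec_game_against_computer candy (game_against_computer candy)

-- ===== LEMMAS AND PROOFS =====
theorem gac_range_eval : PySem.List.pyRange 1 28 1 =
    [1,2,3,4,5,6,7,8,9,10,11,12,13,14,15,16,17,18,19,20,21,22,23,24,25,26,27] := by decide

theorem gac_mem_range (m : Int) :
    m ∈ ([1,2,3,4,5,6,7,8,9,10,11,12,13,14,15,16,17,18,19,20,21,22,23,24,25,26,27] : List Int)
      ↔ 1 ≤ m ∧ m ≤ 27 := by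
  simp only [List.mem_cons, List.not_mem_nil, or_false]
  omega

theorem gacLoop_none (candy : Int) (l : List Int)
    (h1 : candy - 58 ∉ l) (h2 : candy - 29 ∉ l) : gacLoop candy l = 28 := by
  induction l with
  | nil => rfl
  | cons num rest ih =>
    simp only [List.mem_cons, not_or] at h1 h2
    simp only [gacLoop]
    rw [if_neg (by omega), if_neg (by omega)]
    exact ih h1.2 h2.2

theorem gacLoop_n1 (candy : Int) (l : List Int)
    (h1 : candy - 58 ∈ l) (h2 : candy - 29 ∉ l) : gacLoop candy l = candy - 58 := by
  induction l with
  | nil => cases h1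
  | cons num rest ih =>
    simp only [List.mem_cons, not_or] at h2
    rcases List.mem_cons.mp h1 with h | h
    · simp only [gacLoop]
      rw [if_pos (by omega)]
      omega
    · simp only [gacLoop]
      by_cases hc : candy - num - 28 = 30
      · rw [if_pos hc]; omega
      · rw [if_neg hc, if_neg (by omega)]
        exact ih h h2.2

theorem gacLoop_n2 (candy : Int) (l : List Int)
    (h1 : candy - 58 ∉ l) (h2 : candy - 29 ∈ l) : gacLoop candy l = candy - 29 := by
  induction l with
  | nil => cases h2
  | cons num rest ih =>
    simp only [List.mem_cons, not_or] at h1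
    rcases List.mem_cons.mp h2 with h | h
    · simp only [gacLoop]
      rw [if_neg (by omega), if_pos (by omega)]
      omega
    · simp only [gacLoop]
      rw [if_neg (by omega)]
      by_cases hc : candy - num = 29
      · rw [if_pos hc]; omega
      · rw [if_neg hc]
        exact ih h1.2 h

-- ===== VERDICT (by name: the statement is the Claim_ definition above) =====
theorem game_against_computer_spec : Claim_equal_game_against_computer := by
  unfold Claim_equal_game_against_computer
  intro candy _
  unfold Spec_game_against_computer game_against_computer game_against_computer_alt
  by_cases h : candy ≤ 28
  · simp [h]
  · simp only [h, if_false, gac_range_eval]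
    by_cases h1 : 1 ≤ candy - 58 ∧ candy - 58 ≤ 27
    · rw [gacLoop_n1 candy _ ((gac_mem_range _).mpr h1)
        (fun hm => by have := (gac_mem_range _).mp hm; omega)]
      rw [if_pos h1]
    · by_cases h2 : 1 ≤ candy - 29 ∧ candy - 29 ≤ 27
      · rw [gacLoop_n2 candy _
          (fun hm => by have := (gac_mem_range _).mp hm; omega)
          ((gac_mem_range _).mpr h2)]
        rw [if_neg h1, if_pos h2]
      · rw [gacLoop_none candy _
          (fun hm => by have := (gac_mem_range _).mp hm; omega)
          (fun hm => by have := (gac_mem_range _).mp hm; omega)]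
        rw [if_neg h1, if_neg h2]
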